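-- pv_equiv track=rewrite | github.com/Bartosz-Gorka-Archive/timkod_put_poznan_2018 | Exercise_3/exercise_3.py | analyze_characters
-- ===== SOURCE A (Python) =====
-- def analyze_characters(content, row):
--     # Results - dictionary with letters
--     letters = {}
--
--     # Last characters
--     last_characters = []
--
--     # Counter
--     counter = 0
--
--     # Loop to iterate
--     for char in content:
--         if len(last_characters) == row:
--             # Fetch dictionary
--             selected_dictionary = letters.get(''.join(last_characters), {})
--
--             # Update total counter
--             total = selected_dictionary.get('--TOTAL--', 0)
--             selected_dictionary.update({'--TOTAL--': total + 1})
--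
--             # Update counter this letter
--             cardinality = selected_dictionary.get(char, 0)
--             selected_dictionary.update({char: cardinality + 1})
--
--             # Update selected dictionary
--             letters.update({''.join(last_characters): selected_dictionary})
--
--             # Update counter
--             counter += 1
--
--         # Append char to list
--         last_characters.append(char)
--
--         # Check length - if greater than row -> delete first char (FIFO)
--         if len(last_characters) > row:
--             del (last_characters[0])
--
--     # Return letters dictionary with counter
--     return letters, counter
-- ===== SOURCE B (Python) =====
-- def analyze_characters(content, row):
--     seq = list(content)
--
--     # Phase 1: group, for every context of `row` consecutive characters,
--     # the list of characters that follow it.  The (row+1)-grams come from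
--     # zipping the sequence against its own shifted copies.
--     groups = {}
--     # Shifts past len(seq) are empty and would zip to nothing, so the shift
--     # count is capped there; each shifted copy only needs as many elements
--     # as there are grams.
--     count = len(seq) - min(row, len(seq))
--     for gram in zip(*(seq[k:k + count] for k in range(min(row, len(seq)) + 1))):
--         groups.setdefault(''.join(gram[:-1]), []).append(gram[-1])
--
--     # Phase 2: summarize each follower list into its frequency table.
--     letters = {}
--     total = 0
--     for context, followers in groups.items():
--         counts = {'--TOTAL--': len(followers)}
--         for ch in followers:
--             counts[ch] = counts.get(ch, 0) + 1
--         letters[context] = counts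
--         total += len(followers)
--     return letters, total
-- ===== Notes on version B (the rewrite author's own statement) =====
-- stated objective: alternative
-- what changed: Replaces A's single-pass FIFO-buffer loop that increments nested counters in place with a two-phase pipeline: (row+1)-grams are produced by zipping the sequence against its shifted copies (shift count and slice lengths capped at the gram count), grouped into context -> follower-list, then each follower list is summarized into its frequency table in a second pass.
import Mathlib
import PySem

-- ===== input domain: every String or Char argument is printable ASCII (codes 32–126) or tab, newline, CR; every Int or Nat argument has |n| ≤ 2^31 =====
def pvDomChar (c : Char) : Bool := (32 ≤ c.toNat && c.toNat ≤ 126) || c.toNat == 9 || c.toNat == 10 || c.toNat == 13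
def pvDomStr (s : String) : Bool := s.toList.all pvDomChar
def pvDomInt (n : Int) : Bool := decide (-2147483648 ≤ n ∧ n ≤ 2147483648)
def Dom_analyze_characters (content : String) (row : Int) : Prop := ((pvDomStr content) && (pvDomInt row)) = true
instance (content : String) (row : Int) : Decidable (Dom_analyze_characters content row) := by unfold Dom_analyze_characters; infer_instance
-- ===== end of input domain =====

-- B replaces A's one-pass FIFO-buffer counting loop with a two-phase pipeline:
-- zip-of-shifted-copies n-grams grouped into context → follower list, then each
-- follower list summarized into its frequency table (alternative decomposition, same cost).

-- ===== PORT A =====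
-- One iteration of A's `for char in content` loop; state = (letters, last_characters, counter).
def aStep (row : Int) (st : PySem.Dict String (PySem.Dict String Int) × List Char × Int) (c : Char) :
    PySem.Dict String (PySem.Dict String Int) × List Char × Int :=
  let letters := st.1
  let last := st.2.1
  let counter := st.2.2
  let (letters, counter) :=
    if (last.length : Int) = row then
      let key := String.ofList last                       -- ''.join(last_characters)
      let d := letters.getD key PySem.Dict.empty          -- letters.get(..., {})
      let d := d.insert "--TOTAL--" (d.getD "--TOTAL--" 0 + 1)
      let d := d.insert (String.ofList [c]) (d.getD (String.ofList [c]) 0 + 1)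
      (letters.insert key d, counter + 1)                 -- letters.update({...}); counter += 1
    else (letters, counter)
  let last := last ++ [c]                                 -- last_characters.append(char)
  let last := if (last.length : Int) > row then last.drop 1 else last   -- del last_characters[0]
  (letters, last, counter)

def analyze_characters (content : String) (row : Int) : (List (String × List (String × Int))) × Int :=
  let fin := content.toList.foldl (aStep row) (PySem.Dict.empty, [], 0)
  (fin.1.items.map (fun p => (p.1, p.2.items)), fin.2.2)

-- ===== PORT B =====
-- zip(it₁, …, itₙ): take one head from every list until some list is exhausted
-- (zip() of zero iterables yields nothing, matching Python).
def pyZipN {α : Type} : List (List α) → List (List α)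
  | [] => []
  | l :: ls =>
    if _h : l.isEmpty || ls.any List.isEmpty then []
    else ((l :: ls).filterMap List.head?) :: pyZipN (l.drop 1 :: ls.map (fun t => t.drop 1))
  termination_by x => (x.headD []).length
  decreasing_by
    simp only [Bool.or_eq_true, not_or, List.isEmpty_iff] at _h
    simp only [List.headD_cons, List.length_drop]
    have : l ≠ [] := _h.1
    have : 0 < l.length := List.length_pos_of_ne_nil this
    omega

def analyze_characters_alt (content : String) (row : Int) : (List (String × List (String × Int))) × Int :=
  let seq := content.toList
  -- count = len(seq) - min(row, len(seq)); zip(*(seq[k:k+count] for k in range(min(row, len(seq)) + 1)))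
  let count := (seq.length : Int) - min row (seq.length : Int)
  let grams := pyZipN ((PySem.List.pyRange 0 (min row (seq.length : Int) + 1) 1).map
    (fun k => PySem.List.slice seq (some k) (some (k + count))))
  -- groups.setdefault(''.join(gram[:-1]), []).append(gram[-1])
  -- (value semantics of the in-place append; gram[:-1] is dropLast; gram is never
  -- empty — it has row+1 ≥ 1 components — so gram[-1] is its last element)
  let groups := grams.foldl
    (fun (g : PySem.Dict String (List Char)) w =>
      g.modify (String.ofList w.dropLast) [] (· ++ [w.getLastD ' '])) PySem.Dict.empty
  -- phase 2: for context, followers in groups.items(): …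
  let fin := groups.items.foldl
    (fun (st : PySem.Dict String (PySem.Dict String Int) × Int) p =>
      let counts := p.2.foldl
        (fun (d : PySem.Dict String Int) ch =>
          d.insert (String.ofList [ch]) (d.getD (String.ofList [ch]) 0 + 1))
        (PySem.Dict.empty.insert "--TOTAL--" (p.2.length : Int))
      (st.1.insert p.1 counts, st.2 + (p.2.length : Int)))
    (PySem.Dict.empty, 0)
  (fin.1.items.map (fun p => (p.1, p.2.items)), fin.2)

-- ===== PRECONDITION & SPEC =====
def Spec_analyze_characters (content : String) (row : Int) (out : (List (String × List (String × Int))) × Int) : Prop := out = analyze_characters_alt content row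
instance (content : String) (row : Int) (out : (List (String × List (String × Int))) × Int) : Decidable (Spec_analyze_characters content row out) := by unfold Spec_analyze_characters; infer_instance

-- ===== CLAIM (what is proved, stated in full; the proofs are below) =====
def Claim_equal_analyze_characters : Prop := ∀ (content : String) (row : Int), Dom_analyze_characters content row → Spec_analyze_characters content row (analyze_characters content row)

-- ===== LEMMAS AND PROOFS =====

-- --- common vocabulary of the proof ---

-- the key under which a following character is counted
def chKey (c : Char) : String := String.ofList [c]

-- B's phase-2 summary of one follower list
def mkCounts (lst : List Char) : PySem.Dict String Int :=
  lst.foldl (fun d ch => d.insert (chKey ch) (d.getD (chKey ch) 0 + 1))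
    (PySem.Dict.empty.insert "--TOTAL--" (lst.length : Int))

-- A's counted branch, as a step over (context, following char) pairs
def upd (st : PySem.Dict String (PySem.Dict String Int) × Int) (p : String × Char) :
    PySem.Dict String (PySem.Dict String Int) × Int :=
  let d := st.1.getD p.1 PySem.Dict.empty
  let d := d.insert "--TOTAL--" (d.getD "--TOTAL--" 0 + 1)
  let d := d.insert (chKey p.2) (d.getD (chKey p.2) 0 + 1)
  (st.1.insert p.1 d, st.2 + 1)

-- the (context, following char) pairs with pair index ≥ j
def pairsFrom (seq : List Char) (r j : Nat) : List (String × Char) :=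
  (List.range' j (seq.length - r - j)).map
    (fun i => (String.ofList ((seq.drop i).take r), seq.getD (i + r) ' '))

def followers (P : List (String × Char)) (c : String) : List Char :=
  (P.filter (fun q => q.1 == c)).map (·.2)

-- the common result: one entry per distinct context, in first-occurrence order
def specDict (P : List (String × Char)) : PySem.Dict String (PySem.Dict String Int) :=
  PySem.Dict.mk ((PySem.Set.ofList (P.map (·.1))).map (fun c => (c, mkCounts (followers P c))))

-- --- small dictionary lemmas ---

lemma total_ne_chKey (c : Char) : "--TOTAL--" ≠ chKey c := by
  intro h
  have := congrArg (fun s => s.toList.length) h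
  simp [chKey] at this

lemma chKey_ne_total (c : Char) : chKey c ≠ "--TOTAL--" := (total_ne_chKey c).symm

-- inserting at an existing key commutes with inserting at a different key
lemma insert_comm_of_contains {ν : Type} (d : PySem.Dict String ν) (k T : String) (v w : ν)
    (hT : d.contains T = true) (hne : k ≠ T) :
    (d.insert T v).insert k w = (d.insert k w).insert T v := by
  apply PySem.Dict.ext
  have hck : (d.insert T v).contains k = d.contains k := by
    simp [PySem.Dict.contains_insert, hne]
  have hcT : (d.insert k w).contains T = true := by
    simp [PySem.Dict.contains_insert, hT]
  by_cases hkd : d.contains k = true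
  · rw [PySem.Dict.items_insert_of_contains _ _ (hck.trans hkd),
        PySem.Dict.items_insert_of_contains _ _ hT,
        PySem.Dict.items_insert_of_contains _ _ hcT,
        PySem.Dict.items_insert_of_contains _ _ hkd]
    simp only [List.map_map]
    apply List.map_congr_left
    intro p _
    by_cases h1 : p.1 = T
    · simp [Function.comp, h1, (show (T == k) = false by simp [Ne.symm hne])]
    · by_cases h2 : p.1 = k
      · simp [Function.comp, h2, hne]
      · simp [Function.comp, h1, h2]
  · have hkd' : d.contains k = false := by simpa using hkd
    rw [PySem.Dict.items_insert_of_not_contains _ _ (hck.trans hkd'),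
        PySem.Dict.items_insert_of_contains _ _ hT,
        PySem.Dict.items_insert_of_contains _ _ hcT,
        PySem.Dict.items_insert_of_not_contains _ _ hkd']
    rw [List.map_append]
    simp [hne]

-- a fold of per-character inserts never touches the "--TOTAL--" entry
lemma foldl_chars_insert_total (lst : List Char) (d : PySem.Dict String Int) (v : Int)
    (hT : d.contains "--TOTAL--" = true) :
    lst.foldl (fun d ch => d.insert (chKey ch) (d.getD (chKey ch) 0 + 1)) (d.insert "--TOTAL--" v)
      = (lst.foldl (fun d ch => d.insert (chKey ch) (d.getD (chKey ch) 0 + 1)) d).insert "--TOTAL--" v := by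
  induction lst generalizing d with
  | nil => rfl
  | cons ch lst ih =>
      simp only [List.foldl_cons]
      rw [PySem.Dict.getD_insert_of_ne _ _ _ (chKey_ne_total ch),
          insert_comm_of_contains d (chKey ch) "--TOTAL--" _ _ hT (chKey_ne_total ch),
          ih _ (by simp [PySem.Dict.contains_insert, hT])]

lemma foldl_chars_getD_total (lst : List Char) (d : PySem.Dict String Int) :
    (lst.foldl (fun d ch => d.insert (chKey ch) (d.getD (chKey ch) 0 + 1)) d).getD "--TOTAL--" 0
      = d.getD "--TOTAL--" 0 := by
  induction lst generalizing d with
  | nil => rfl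
  | cons ch lst ih =>
      simp only [List.foldl_cons]
      rw [ih, PySem.Dict.getD_insert_of_ne _ _ _ (total_ne_chKey ch)]

lemma mkCounts_getD_total (lst : List Char) :
    (mkCounts lst).getD "--TOTAL--" 0 = (lst.length : Int) := by
  rw [mkCounts, foldl_chars_getD_total, PySem.Dict.getD_insert_self]

-- the inner summary absorbs one more follower exactly as A's counted branch does
lemma mkCounts_append (lst : List Char) (x : Char) :
    mkCounts (lst ++ [x])
      = ((mkCounts lst).insert "--TOTAL--" ((mkCounts lst).getD "--TOTAL--" 0 + 1)).insert
          (chKey x) ((mkCounts lst).getD (chKey x) 0 + 1) := by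
  have hlen : ((lst ++ [x]).length : Int) = (lst.length : Int) + 1 := by
    simp
  rw [mkCounts, List.foldl_append, hlen,
      show PySem.Dict.empty.insert "--TOTAL--" ((lst.length : Int) + 1)
         = (PySem.Dict.empty.insert "--TOTAL--" (lst.length : Int)).insert "--TOTAL--" ((lst.length : Int) + 1) from
        (PySem.Dict.insert_insert_self _ _ _ _).symm,
      foldl_chars_insert_total _ _ _ (by simp)]
  rw [← mkCounts]
  simp only [List.foldl_cons, List.foldl_nil]
  rw [PySem.Dict.getD_insert_of_ne _ _ _ ((total_ne_chKey x).symm), mkCounts_getD_total]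

-- --- characterization of A's counting loop over the pair list ---

lemma specDict_keys (P : List (String × Char)) :
    (specDict P).keys = PySem.Set.ofList (P.map (·.1)) := by
  show ((PySem.Set.ofList (P.map (·.1))).map (fun c => (c, mkCounts (followers P c)))).map (·.1)
      = PySem.Set.ofList (P.map (·.1))
  simp [Function.comp_def]

lemma specDict_nodup (P : List (String × Char)) : (specDict P).keys.Nodup := by
  rw [specDict_keys]; exact PySem.Set.nodup_ofList _

-- absorbing one more pair into the common result
lemma specDict_insert (P : List (String × Char)) (p : String × Char) :
    (specDict P).insert p.1
      ((((specDict P).getD p.1 PySem.Dict.empty).insert "--TOTAL--"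
          (((specDict P).getD p.1 PySem.Dict.empty).getD "--TOTAL--" 0 + 1)).insert (chKey p.2)
        (((((specDict P).getD p.1 PySem.Dict.empty).insert "--TOTAL--"
          (((specDict P).getD p.1 PySem.Dict.empty).getD "--TOTAL--" 0 + 1))).getD (chKey p.2) 0 + 1))
    = specDict (P ++ [p]) := by
  have hfoll : ∀ c, followers (P ++ [p]) c = followers P c ++ (if p.1 == c then [p.2] else []) := by
    intro c
    by_cases h : p.1 = c
    · simp [followers, List.filter_append, h]
    · simp [followers, List.filter_append, h]
  by_cases hmem : p.1 ∈ P.map (·.1)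
  · have hS : p.1 ∈ PySem.Set.ofList (P.map (·.1)) := (PySem.Set.mem_ofList _ _).mpr hmem
    have hmemit : (p.1, mkCounts (followers P p.1)) ∈ (specDict P).items := by
      show _ ∈ (PySem.Set.ofList (P.map (·.1))).map (fun c => (c, mkCounts (followers P c)))
      exact List.mem_map.mpr ⟨p.1, hS, rfl⟩
    have hd0 : (specDict P).getD p.1 PySem.Dict.empty = mkCounts (followers P p.1) :=
      PySem.Dict.getD_of_mem_items _ hmemit (specDict_nodup P) _
    have hcont : (specDict P).contains p.1 = true := by
      rw [PySem.Dict.contains_iff_mem_keys, specDict_keys]; exact hS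
    have hS' : PySem.Set.ofList ((P ++ [p]).map (·.1)) = PySem.Set.ofList (P.map (·.1)) := by
      rw [List.map_append, List.map_singleton, PySem.Set.ofList_append_singleton,
          PySem.Set.add_of_mem hS]
    apply PySem.Dict.ext
    rw [PySem.Dict.items_insert_of_contains _ _ hcont]
    show _ = ((PySem.Set.ofList ((P ++ [p]).map (·.1))).map
        (fun c => (c, mkCounts (followers (P ++ [p]) c))))
    rw [hS']
    show ((PySem.Set.ofList (P.map (·.1))).map (fun c => (c, mkCounts (followers P c)))).map _ = _
    rw [List.map_map]
    apply List.map_congr_left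
    intro c hc
    by_cases hcp : c = p.1
    · subst hcp
      simp only [Function.comp_def, beq_self_eq_true, if_pos]
      rw [hfoll, if_pos (by simp), hd0, mkCounts_append,
          PySem.Dict.getD_insert_of_ne _ _ _ (chKey_ne_total p.2)]
    · simp only [Function.comp_def, (show (c == p.1) = false by simp [hcp]), Bool.false_eq_true,
        if_false]
      rw [hfoll, if_neg (by simp [Ne.symm hcp]), List.append_nil]
  · have hS : p.1 ∉ PySem.Set.ofList (P.map (·.1)) := fun h => hmem ((PySem.Set.mem_ofList _ _).mp h)
    have hcont : (specDict P).contains p.1 = false := by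
      have := (PySem.Dict.contains_iff_mem_keys (specDict P) p.1)
      rw [specDict_keys] at this
      cases h : (specDict P).contains p.1
      · rfl
      · exact absurd (this.mp h) hS
    have hfp : followers P p.1 = [] := by
      simp only [followers, List.map_eq_nil_iff, List.filter_eq_nil_iff]
      intro q hq hbe
      exact hmem (List.mem_map.mpr ⟨q, hq, by simpa using hbe⟩)
    have hd0 : (specDict P).getD p.1 PySem.Dict.empty = PySem.Dict.empty :=
      PySem.Dict.getD_of_not_contains _ _ hcont
    have hS' : PySem.Set.ofList ((P ++ [p]).map (·.1))
        = PySem.Set.ofList (P.map (·.1)) ++ [p.1] := by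
      rw [List.map_append, List.map_singleton, PySem.Set.ofList_append_singleton,
          PySem.Set.add_of_not_mem hS]
    apply PySem.Dict.ext
    rw [PySem.Dict.items_insert_of_not_contains _ _ hcont]
    show _ = ((PySem.Set.ofList ((P ++ [p]).map (·.1))).map
        (fun c => (c, mkCounts (followers (P ++ [p]) c))))
    rw [hS', List.map_append, List.map_singleton]
    congr 1
    · show (PySem.Set.ofList (P.map (·.1))).map (fun c => (c, mkCounts (followers P c))) = _
      apply List.map_congr_left
      intro c hc
      have hcp : p.1 ≠ c := fun h => hS (h ▸ hc)
      rw [hfoll, if_neg (by simp [hcp]), List.append_nil]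
    · rw [hfoll, if_pos (by simp), hfp, List.nil_append, hd0]
      simp [mkCounts, chKey]

lemma foldl_upd_spec (P : List (String × Char)) :
    P.foldl upd (PySem.Dict.empty, 0) = (specDict P, (P.length : Int)) := by
  induction P using List.reverseRecOn with
  | nil => rfl
  | append_singleton P p ih =>
      rw [List.foldl_append, ih, List.foldl_cons, List.foldl_nil]
      refine Prod.ext ?_ (by simp [upd])
      show (specDict P).insert p.1 _ = specDict (P ++ [p])
      exact specDict_insert P p

-- --- A's character loop consumes exactly the pair list ---

lemma aFold_neg (row : Int) (hrow : row < 0) (l : List Char)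
    (L : PySem.Dict String (PySem.Dict String Int)) (cnt : Int) :
    l.foldl (aStep row) (L, [], cnt) = (L, [], cnt) := by
  induction l with
  | nil => rfl
  | cons c l ih =>
      simp only [List.foldl_cons, aStep]
      have h1 : ¬ (([] : List Char).length : Int) = row := by simp; omega
      have h2 : ((([] : List Char) ++ [c]).length : Int) > row := by simp; omega
      simp only [h1, if_false, h2, if_pos]
      simpa using ih

lemma main_inv (r : Nat) (seq : List Char) :
    ∀ (rest pre : List Char), pre ++ rest = seq →
    ∀ (L : PySem.Dict String (PySem.Dict String Int)) (cnt : Int),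
    rest.foldl (aStep (r : Int)) (L, pre.drop (pre.length - r), cnt)
      = (((pairsFrom seq r (pre.length - r)).foldl upd (L, cnt)).1,
         seq.drop (seq.length - r),
         ((pairsFrom seq r (pre.length - r)).foldl upd (L, cnt)).2) := by
  intro rest
  induction rest with
  | nil =>
      intro pre hseq L cnt
      subst hseq
      simp [pairsFrom, List.append_nil]
  | cons c rest ih =>
      intro pre hseq L cnt
      have hn : pre.length + 1 + rest.length = seq.length := by
        rw [← hseq]; simp; omega
      by_cases hlen : r ≤ pre.length
      · -- window full: this step consumes pair (pre.length - r)
        have hw : (pre.drop (pre.length - r)).length = r := by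
          simp [List.length_drop]; omega
        have hwseq : pre.drop (pre.length - r) = (seq.drop (pre.length - r)).take r := by
          rw [← hseq, List.drop_append_of_le_length (by omega)]
          set w := pre.drop (pre.length - r) with hwdef
          rw [← hw, List.take_left]
        have hc : seq.getD (pre.length - r + r) ' ' = c := by
          have h2 : pre.length - r + r = pre.length := by omega
          rw [h2, ← hseq]
          simp
        have hpairs : pairsFrom seq r (pre.length - r)
            = (String.ofList (pre.drop (pre.length - r)), c) :: pairsFrom seq r ((pre ++ [c]).length - r) := by
          rw [pairsFrom, pairsFrom]
          have h1 : seq.length - r - (pre.length - r)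
              = (seq.length - r - ((pre ++ [c]).length - r)) + 1 := by
            simp; omega
          rw [h1, List.range'_succ, List.map_cons, hc, hwseq]
          have h3 : pre.length - r + 1 = (pre ++ [c]).length - r := by simp; omega
          rw [h3]
        have hA : ((pre.drop (pre.length - r)).length : Int) = (r : Int) := by rw [hw]
        simp only [List.foldl_cons, aStep, hA, if_pos]
        have hgt : (((pre.drop (pre.length - r) ++ [c]).length : Int)) > (r : Int) := by
          simp [hw]
        have hdrop : (pre.drop (pre.length - r) ++ [c]).drop 1
            = (pre ++ [c]).drop ((pre ++ [c]).length - r) := by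
          have h4 : pre.drop (pre.length - r) ++ [c] = (pre ++ [c]).drop (pre.length - r) := by
            rw [List.drop_append_of_le_length (by omega)]
          rw [h4, List.drop_drop]
          congr 1
          simp; omega
        simp only [hgt, if_pos, hdrop]
        rw [hpairs, List.foldl_cons]
        have hup : upd (L, cnt) (String.ofList (pre.drop (pre.length - r)), c)
            = (L.insert (String.ofList (pre.drop (pre.length - r)))
                (((L.getD (String.ofList (pre.drop (pre.length - r))) PySem.Dict.empty).insert "--TOTAL--"
                    ((L.getD (String.ofList (pre.drop (pre.length - r))) PySem.Dict.empty).getD "--TOTAL--" 0 + 1)).insert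
                  (String.ofList [c])
                  (((L.getD (String.ofList (pre.drop (pre.length - r))) PySem.Dict.empty).insert "--TOTAL--"
                    ((L.getD (String.ofList (pre.drop (pre.length - r))) PySem.Dict.empty).getD "--TOTAL--" 0 + 1)).getD
                    (String.ofList [c]) 0 + 1)),
               cnt + 1) := rfl
        rw [hup]
        exact ih (pre ++ [c]) (by simpa using hseq) _ _
      · -- window not yet full: no pair is consumed
        rw [not_le] at hlen
        have h0 : pre.length - r = 0 := by omega
        have h0' : (pre ++ [c]).length - r = 0 := by simp; omega
        have hA : ¬ ((pre.drop (pre.length - r)).length : Int) = (r : Int) := by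
          rw [h0]; simp; omega
        have hng : ¬ (((pre.drop (pre.length - r) ++ [c]).length : Int) > (r : Int)) := by
          rw [h0]; simp; omega
        simp only [List.foldl_cons, aStep]
        rw [if_neg hA, if_neg hng]
        have hstep : (pre.drop (pre.length - r)) ++ [c] = (pre ++ [c]).drop ((pre ++ [c]).length - r) := by
          rw [h0, h0', List.drop_zero, List.drop_zero]
        rw [hstep]
        have := ih (pre ++ [c]) (by simpa using hseq) L cnt
        have h0'' : pre.length + 1 - r = 0 := by omega
        simpa [h0, h0', h0''] using this

-- --- B's gram generation produces the windows ---

lemma pyZipN_nil_of_empty {α : Type} (l : List α) (ls : List (List α))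
    (h : (l.isEmpty || ls.any List.isEmpty) = true) : pyZipN (l :: ls) = [] := by
  rw [pyZipN]; simp [h]

lemma pyZipN_cons {α : Type} (l : List α) (ls : List (List α))
    (h : (l.isEmpty || ls.any List.isEmpty) = false) :
    pyZipN (l :: ls) = ((l :: ls).filterMap List.head?) :: pyZipN (l.drop 1 :: ls.map (fun t => t.drop 1)) := by
  rw [pyZipN]; simp [h]

lemma zip_windows (seq : List Char) (r : Nat) :
    ∀ (m j : Nat), seq.length - r - j = m →
    pyZipN ((List.range (r + 1)).map (fun k => (seq.drop (j + k)).take m))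
      = (List.range' j m).map (fun i => (seq.drop i).take (r + 1)) := by
  intro m
  induction m with
  | zero =>
      intro j hm
      rw [List.range_succ_eq_map, List.map_cons, List.range'_zero, List.map_nil]
      apply pyZipN_nil_of_empty
      simp
  | succ m ihm =>
      intro j hm
      have hjr : j + r < seq.length := by omega
      have hemp : ∀ (l : List Char), ((l.take (m + 1)).isEmpty) = l.isEmpty := by
        intro l; cases l <;> simp
      have hne : (((seq.drop (j + 0)).take (m + 1)).isEmpty
          || (((List.range r).map Nat.succ).map (fun k => (seq.drop (j + k)).take (m + 1))).any List.isEmpty) = false := by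
        rw [Bool.or_eq_false_iff]
        constructor
        · rw [hemp]
          simp [List.drop_eq_nil_iff]
          omega
        · rw [List.any_eq_false]
          intro x hx
          rw [List.map_map, List.mem_map] at hx
          obtain ⟨k, hk, rfl⟩ := hx
          rw [List.mem_range] at hk
          rw [Function.comp_apply, hemp]
          simp [List.drop_eq_nil_iff]
          omega
      rw [List.range_succ_eq_map, List.map_cons, pyZipN_cons _ _ hne]
      have hhd : ∀ (l : List Char), (l.take (m + 1)).head? = l.head? := by
        intro l; cases l <;> simp
      have hheads : (((seq.drop (j + 0)).take (m + 1))
            :: (((List.range r).map Nat.succ).map (fun k => (seq.drop (j + k)).take (m + 1)))).filterMap List.head?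
          = (seq.drop j).take (r + 1) := by
        rw [show ((seq.drop (j + 0)).take (m + 1) :: List.map (fun k => (seq.drop (j + k)).take (m + 1)) (List.map Nat.succ (List.range r)))
              = (List.range (r + 1)).map (fun k => (seq.drop (j + k)).take (m + 1)) from by
            rw [List.range_succ_eq_map, List.map_cons], List.filterMap_map]
        have h1 : ∀ k ∈ List.range (r + 1),
            (List.head? ∘ fun k => (seq.drop (j + k)).take (m + 1)) k = some (seq.getD (j + k) ' ') := by
          intro k hk
          rw [List.mem_range] at hk
          have hlt : j + k < seq.length := by omega
          simp only [Function.comp_apply, hhd, List.head?_drop, List.getD,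
            List.getElem?_eq_getElem hlt, Option.getD_some]
        rw [List.filterMap_congr h1]
        rw [show (fun k => some (seq.getD (j + k) ' ')) = some ∘ (fun k => seq.getD (j + k) ' ') from rfl,
          List.filterMap_eq_map]
        apply List.ext_getElem
        · simp [List.length_take, List.length_drop]
          omega
        · intro i h1' h2'
          simp only [List.getElem_map, List.getElem_range, List.getElem_take, List.getElem_drop,
            List.getD]
          rw [List.getElem?_eq_getElem (by simp at h1'; omega)]
          rfl
      rw [hheads]
      have hdt : ∀ (l : List Char), (l.take (m + 1)).drop 1 = (l.drop 1).take m := by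
        intro l
        rw [List.drop_take]
        norm_num
      have htails : ((seq.drop (j + 0)).take (m + 1)).drop 1
            :: ((((List.range r).map Nat.succ).map (fun k => (seq.drop (j + k)).take (m + 1))).map (fun t => t.drop 1))
          = (List.range (r + 1)).map (fun k => (seq.drop ((j + 1) + k)).take m) := by
        rw [List.range_succ_eq_map, List.map_cons, List.map_map, List.map_map]
        congr 1
        · rw [hdt, List.drop_drop]
        · rw [List.map_map]
          apply List.map_congr_left
          intro k hk
          simp only [Function.comp_apply, hdt, List.drop_drop]
          congr 2
          omega
      rw [htails, ihm (j + 1) (by omega), List.range'_succ]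
      rfl

-- --- B's grouping and summarizing reaches the same result ---

lemma window_dropLast (seq : List Char) (i r : Nat) (h : i + r < seq.length) :
    ((seq.drop i).take (r + 1)).dropLast = (seq.drop i).take r := by
  rw [List.dropLast_eq_take, List.take_take, List.length_take, List.length_drop]
  congr 1
  omega

lemma window_getLastD (seq : List Char) (i r : Nat) (h : i + r < seq.length) :
    ((seq.drop i).take (r + 1)).getLastD ' ' = seq.getD (i + r) ' ' := by
  rw [List.getLastD_eq_getLast?, List.getLast?_eq_getElem?]
  have h1 : ((seq.drop i).take (r + 1)).length = r + 1 := by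
    simp [List.length_take, List.length_drop]
    omega
  rw [h1]
  simp only [Nat.add_sub_cancel, List.getElem?_take, List.getElem?_drop, List.getD]
  simp

lemma sum_counts (xs : List String) :
    ((PySem.Set.ofList xs).map (fun c => (xs.count c : Int))).sum = (xs.length : Int) := by
  induction xs using List.reverseRecOn with
  | nil => rfl
  | append_singleton xs x ih =>
      rw [PySem.Set.ofList_append_singleton]
      by_cases hx : x ∈ PySem.Set.ofList xs
      · rw [PySem.Set.add_of_mem hx]
        have hsplit : ∀ c, ((xs ++ [x]).count c : Int)
            = (xs.count c : Int) + (if x == c then 1 else 0) := by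
          intro c
          rw [List.count_append]
          by_cases h : x = c
          · subst h; simp
          · simp [h, (show (x == c) = false by simp [h])]
        calc ((PySem.Set.ofList xs).map (fun c => ((xs ++ [x]).count c : Int))).sum
            = ((PySem.Set.ofList xs).map (fun c => (xs.count c : Int) + (if x == c then 1 else 0))).sum := by
              apply congrArg
              exact List.map_congr_left (fun c _ => hsplit c)
          _ = ((PySem.Set.ofList xs).map (fun c => (xs.count c : Int))).sum
              + ((PySem.Set.ofList xs).map (fun c => if (fun c => x == c) c = true then (1 : Int) else 0)).sum := by
              rw [PySem.List.sum_map_add_int]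
          _ = (xs.length : Int) + 1 := by
              rw [ih, PySem.List.sum_map_ite_one_zero]
              congr 1
              have : List.countP (fun c => x == c) (PySem.Set.ofList xs)
                  = List.count x (PySem.Set.ofList xs) := by
                apply List.countP_congr
                intro c _
                by_cases h : x = c
                · simp [h]
                · simp [h, Ne.symm h]
              rw [this, List.count_eq_one_of_mem (PySem.Set.nodup_ofList _) hx]
              rfl
          _ = ((xs ++ [x]).length : Int) := by simp
      · rw [PySem.Set.add_of_not_mem hx, List.map_append, List.sum_append]
        have hxs : x ∉ xs := fun h => hx ((PySem.Set.mem_ofList _ _).mpr h)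
        have h1 : (PySem.Set.ofList xs).map (fun c => ((xs ++ [x]).count c : Int))
            = (PySem.Set.ofList xs).map (fun c => (xs.count c : Int)) := by
          apply List.map_congr_left
          intro c hc
          have hcx : x ≠ c := fun h => hx (h ▸ hc)
          rw [List.count_append, List.count_singleton']
          simp [hcx]
        rw [h1, ih]
        simp [List.count_eq_zero_of_not_mem hxs]

lemma phase2_split (its : List (String × List Char))
    (d : PySem.Dict String (PySem.Dict String Int)) (t : Int) :
    its.foldl (fun st p => (st.1.insert p.1 (mkCounts p.2), st.2 + (p.2.length : Int))) (d, t)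
      = (its.foldl (fun d p => d.insert p.1 (mkCounts p.2)) d,
         t + (its.map (fun p => (p.2.length : Int))).sum) := by
  induction its generalizing d t with
  | nil => simp
  | cons p its ih =>
      simp only [List.foldl_cons, List.map_cons, List.sum_cons, ih]
      congr 1
      ring

lemma b_result (P : List (String × Char)) :
    (P.foldl (fun (g : PySem.Dict String (List Char)) p => g.modify p.1 [] (· ++ [p.2]))
        PySem.Dict.empty).items.foldl
      (fun (st : PySem.Dict String (PySem.Dict String Int) × Int) p =>
        (st.1.insert p.1
          (p.2.foldl (fun (d : PySem.Dict String Int) ch =>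
              d.insert (String.ofList [ch]) (d.getD (String.ofList [ch]) 0 + 1))
            (PySem.Dict.empty.insert "--TOTAL--" (p.2.length : Int))),
         st.2 + (p.2.length : Int)))
      (PySem.Dict.empty, 0)
    = (specDict P, (P.length : Int)) := by
  have hnodup : (P.foldl (fun (g : PySem.Dict String (List Char)) p => g.modify p.1 [] (· ++ [p.2]))
      PySem.Dict.empty).keys.Nodup :=
    PySem.Dict.nodup_keys_foldl_modify_key P (·.1) [] (fun _ p v => v ++ [p.2]) _ (by simp)
  have hkeys : (P.foldl (fun (g : PySem.Dict String (List Char)) p => g.modify p.1 [] (· ++ [p.2]))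
      PySem.Dict.empty).keys = PySem.Set.ofList (P.map (·.1)) := by
    rw [PySem.Dict.keys_foldl_modify_key P (·.1) [] (fun _ p v => v ++ [p.2])]
    rw [show (PySem.Dict.empty : PySem.Dict String (List Char)).keys = [] from rfl,
        PySem.Set.update_nil_left]
  have hgetD : ∀ c, (P.foldl (fun (g : PySem.Dict String (List Char)) p => g.modify p.1 [] (· ++ [p.2]))
      PySem.Dict.empty).getD c [] = followers P c := by
    intro c
    rw [PySem.Dict.getD_foldl_modify_append]
    simp [followers]
  have hitems : (P.foldl (fun (g : PySem.Dict String (List Char)) p => g.modify p.1 [] (· ++ [p.2]))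
        PySem.Dict.empty).items
      = (PySem.Set.ofList (P.map (·.1))).map (fun c => (c, followers P c)) := by
    rw [PySem.Dict.items_eq_map_keys _ hnodup [], hkeys]
    exact List.map_congr_left (fun c _ => by rw [hgetD])
  rw [hitems]
  show ((PySem.Set.ofList (P.map (·.1))).map (fun c => (c, followers P c))).foldl
      (fun (st : PySem.Dict String (PySem.Dict String Int) × Int) p =>
        (st.1.insert p.1 (mkCounts p.2), st.2 + (p.2.length : Int)))
      (PySem.Dict.empty, 0) = _
  rw [phase2_split]
  have hknodup : (((PySem.Set.ofList (P.map (·.1))).map (fun c => (c, followers P c))).map (fun p => p.1)).Nodup := by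
    simp only [List.map_map]
    simp [Function.comp_def, PySem.Set.nodup_ofList]
  have hfresh : (((PySem.Set.ofList (P.map (·.1))).map (fun c => (c, followers P c))).foldl
        (fun (d : PySem.Dict String (PySem.Dict String Int)) p => d.insert p.1 (mkCounts p.2))
        PySem.Dict.empty).items
      = PySem.Dict.empty.items
        ++ ((PySem.Set.ofList (P.map (·.1))).map (fun c => (c, followers P c))).map
            (fun (p : String × List Char) => (p.1, mkCounts p.2)) :=
    PySem.Dict.items_foldl_insert_fresh _ (fun (p : String × List Char) => p.1)
      (fun (p : String × List Char) => mkCounts p.2) PySem.Dict.empty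
      (fun a _ => by simp) hknodup
  have hdict : ((PySem.Set.ofList (P.map (·.1))).map (fun c => (c, followers P c))).foldl
        (fun (d : PySem.Dict String (PySem.Dict String Int)) p => d.insert p.1 (mkCounts p.2))
        PySem.Dict.empty
      = specDict P := by
    apply PySem.Dict.ext
    rw [hfresh]
    show _ ++ _ = (PySem.Set.ofList (P.map (·.1))).map (fun c => (c, mkCounts (followers P c)))
    rw [List.map_map]
    simp [Function.comp_def,
      show (PySem.Dict.empty : PySem.Dict String (PySem.Dict String Int)).items = [] from rfl]
  rw [hdict]
  refine Prod.ext rfl ?_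
  · show (0 : Int) + _ = (P.length : Int)
    rw [zero_add, List.map_map]
    have hlen : ∀ c, ((followers P c).length : Int) = ((P.map (·.1)).count c : Int) := by
      intro c
      rw [followers, List.length_map, ← List.countP_eq_length_filter,
          List.count, List.countP_map]
      rfl
    calc ((PySem.Set.ofList (P.map (·.1))).map
            ((fun p => ((p.2 : List Char).length : Int)) ∘ fun c => (c, followers P c))).sum
        = ((PySem.Set.ofList (P.map (·.1))).map (fun c => ((P.map (·.1)).count c : Int))).sum := by
          apply congrArg
          exact List.map_congr_left (fun c _ => hlen c)
      _ = ((P.map (·.1)).length : Int) := sum_counts _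
      _ = (P.length : Int) := by simp

-- --- both programs compute the common result ---

lemma a_eq (content : String) (r : Nat) :
    analyze_characters content (r : Int)
      = ((specDict (pairsFrom content.toList r 0)).items.map (fun p => (p.1, p.2.items)),
         ((pairsFrom content.toList r 0).length : Int)) := by
  have h := main_inv r content.toList content.toList [] (by simp) PySem.Dict.empty 0
  simp only [List.length_nil, Nat.zero_sub, List.drop_nil] at h
  simp only [analyze_characters, h, foldl_upd_spec]

lemma b_eq (content : String) (r : Nat) :
    analyze_characters_alt content (r : Int)
      = ((specDict (pairsFrom content.toList r 0)).items.map (fun p => (p.1, p.2.items)),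
         ((pairsFrom content.toList r 0).length : Int)) := by
  have hgr : (PySem.List.pyRange 0 (min (r : Int) (content.toList.length : Int) + 1) 1).map
        (fun k => PySem.List.slice content.toList (some k)
          (some (k + ((content.toList.length : Int) - min (r : Int) (content.toList.length : Int)))))
      = (List.range (min r content.toList.length + 1)).map
        (fun k => (content.toList.drop (0 + k)).take (content.toList.length - min r content.toList.length)) := by
    rw [PySem.List.pyRange_one, List.map_map]
    have h1 : (min (r : Int) (content.toList.length : Int) + 1 - 0).toNat
        = min r content.toList.length + 1 := by omega
    rw [h1]
    apply List.map_congr_left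
    intro k hk
    show PySem.List.slice content.toList (some ((0 : Int) + (k : Int)))
        (some (((0 : Int) + (k : Int)) + ((content.toList.length : Int) - min (r : Int) (content.toList.length : Int))))
      = (content.toList.drop (0 + k)).take (content.toList.length - min r content.toList.length)
    rw [zero_add, Nat.zero_add]
    have hsub : (content.toList.length : Int) - min (r : Int) (content.toList.length : Int)
        = ((content.toList.length - min r content.toList.length : Nat) : Int) := by
      omega
    rw [hsub, PySem.List.slice_natCast_add]
  have hz := zip_windows content.toList (min r content.toList.length)
    (content.toList.length - min r content.toList.length) 0 (by omega)
  by_cases hr : r ≤ content.toList.length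
  · have hmin : min r content.toList.length = r := by omega
    rw [hmin] at hgr hz
    have hfold : ((List.range' 0 (content.toList.length - r)).map (fun i => (content.toList.drop i).take (r + 1))).foldl
          (fun (g : PySem.Dict String (List Char)) w => g.modify (String.ofList w.dropLast) [] (· ++ [w.getLastD ' ']))
          PySem.Dict.empty
        = (pairsFrom content.toList r 0).foldl
          (fun (g : PySem.Dict String (List Char)) p => g.modify p.1 [] (· ++ [p.2])) PySem.Dict.empty := by
      rw [List.foldl_map, pairsFrom, Nat.sub_zero, List.foldl_map]
      apply PySem.List.foldl_congr_mem
      intro acc i hi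
      have hi' : i + r < content.toList.length := by
        have := List.mem_range'_1.mp hi
        omega
      rw [window_dropLast _ _ _ hi', window_getLastD _ _ _ hi']
    simp only [analyze_characters_alt, hgr, hz, hfold, b_result]
  · -- row longer than the text: no gram and no pair exists
    have hm0 : content.toList.length - min r content.toList.length = 0 := by omega
    rw [hm0] at hgr
    rw [hm0, List.range'_zero, List.map_nil] at hz
    have hp0 : pairsFrom content.toList r 0 = [] := by
      rw [pairsFrom]
      have : content.toList.length - r - 0 = 0 := by omega
      rw [this, List.range'_zero, List.map_nil]
    simp only [analyze_characters_alt, hgr, hz, hp0, List.foldl_nil]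
    rfl

-- ===== VERDICT (by name: the statement is the Claim_ definition above) =====
theorem analyze_characters_spec : Claim_equal_analyze_characters := by
  intro content row _
  unfold Spec_analyze_characters
  by_cases hrow : 0 ≤ row
  · obtain ⟨r, rfl⟩ : ∃ r : Nat, row = (r : Int) := ⟨row.toNat, (Int.toNat_of_nonneg hrow).symm⟩
    rw [a_eq, b_eq]
  · have hneg : row < 0 := by omega
    have hA := aFold_neg row hneg content.toList PySem.Dict.empty 0
    have hB : PySem.List.pyRange 0 (min row (content.toList.length : Int) + 1) 1 = [] :=
      PySem.List.pyRange_one_eq_nil (by omega)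
    have hzn : pyZipN ([] : List (List Char)) = [] := by rw [pyZipN]
    simp only [analyze_characters, analyze_characters_alt, hA, hB, List.map_nil, hzn,
      List.foldl_nil]
    rfl
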